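-- pv_equiv track=rewrite | github.com/Sundau143/LP-Vision | lpr_script.py | detect_ukraine_region
-- ===== SOURCE A (Python) =====
-- def detect_ukraine_region(license_plate):
--     ukraine_regions = {
--         'АР Крим': ['AK', 'KK'],
--         'Вінницька область': ['AB', 'KB'],
--         'Волинська область': ['AC', 'KC'],
--         'Дніпропетровська область': ['AE', 'KE'],
--         'Донецька область': ['AH', 'KH'],
--         'Житомирська область': ['AM', 'KM'],
--         'Закарпатська область': ['AO', 'KO'],
--         'Запорізька область': ['AP', 'KP'],
--         'Івано-Франківська область': ['AT', 'KT'],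
--         'Київська область': ['AI', 'KI'],
--         'м. Київ': ['AA', 'KA'],
--         'Кіровоградська область': ['BA', 'HA'],
--         'Луганська область': ['BB', 'HB'],
--         'Львівська область': ['BC', 'HC'],
--         'Миколаївська область': ['BE', 'HE'],
--         'Одеська область': ['BH', 'HH'],
--         'Полтавська область': ['BI', 'HI'],
--         'Рівненська область': ['BK', 'HK'],
--         'Сумська область': ['BM', 'HM'],
--         'Тернопільська область': ['BO', 'HO'],
--         'Харківська область': ['AX', 'KX'],
--         'Херсонська область': ['BT', 'HT'],
--         'Хмельницька область': ['BX', 'HX'],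
--         'Черкаська область': ['CA', 'IA'],
--         'Чернігівська область': ['CB', 'IB'],
--         'Чернівецька область': ['CE', 'IE'],
--         'м. Севастополь': ['CH', 'HH']
--     }
--
--     for region, letters in ukraine_regions.items():
--         for letter in letters:
--             if license_plate.startswith(letter):
--                 return region
--
--     return
-- ===== SOURCE B (Python) =====
-- # Hardcoded reverse index: two-letter series code -> region, one entry per code
-- # (the duplicate code 'HH' keeps its first binding, 'Одеська область').
-- _PREFIX_TO_REGION = {
--     'AK': 'АР Крим',
--     'KK': 'АР Крим',
--     'AB': 'Вінницька область',
--     'KB': 'Вінницька область',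
--     'AC': 'Волинська область',
--     'KC': 'Волинська область',
--     'AE': 'Дніпропетровська область',
--     'KE': 'Дніпропетровська область',
--     'AH': 'Донецька область',
--     'KH': 'Донецька область',
--     'AM': 'Житомирська область',
--     'KM': 'Житомирська область',
--     'AO': 'Закарпатська область',
--     'KO': 'Закарпатська область',
--     'AP': 'Запорізька область',
--     'KP': 'Запорізька область',
--     'AT': 'Івано-Франківська область',
--     'KT': 'Івано-Франківська область',
--     'AI': 'Київська область',
--     'KI': 'Київська область',
--     'AA': 'м. Київ',
--     'KA': 'м. Київ',
--     'BA': 'Кіровоградська область',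
--     'HA': 'Кіровоградська область',
--     'BB': 'Луганська область',
--     'HB': 'Луганська область',
--     'BC': 'Львівська область',
--     'HC': 'Львівська область',
--     'BE': 'Миколаївська область',
--     'HE': 'Миколаївська область',
--     'BH': 'Одеська область',
--     'HH': 'Одеська область',
--     'BI': 'Полтавська область',
--     'HI': 'Полтавська область',
--     'BK': 'Рівненська область',
--     'HK': 'Рівненська область',
--     'BM': 'Сумська область',
--     'HM': 'Сумська область',
--     'BO': 'Тернопільська область',
--     'HO': 'Тернопільська область',
--     'AX': 'Харківська область',
--     'KX': 'Харківська область',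
--     'BT': 'Херсонська область',
--     'HT': 'Херсонська область',
--     'BX': 'Хмельницька область',
--     'HX': 'Хмельницька область',
--     'CA': 'Черкаська область',
--     'IA': 'Черкаська область',
--     'CB': 'Чернігівська область',
--     'IB': 'Чернігівська область',
--     'CE': 'Чернівецька область',
--     'IE': 'Чернівецька область',
--     'CH': 'м. Севастополь',
-- }
--
--
-- def detect_ukraine_region(license_plate):
--     return _PREFIX_TO_REGION.get(license_plate[:2])
-- ===== Notes on version B (the rewrite author's own statement) =====
-- stated objective: simpler
-- what changed: Replaces A's nested scan of a region->codes dict with startswith on every code by a flat reverse index code->region (first-wins on the duplicate code 'HH'), so the function body is a single lookup of license_plate[:2].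
import Mathlib
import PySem

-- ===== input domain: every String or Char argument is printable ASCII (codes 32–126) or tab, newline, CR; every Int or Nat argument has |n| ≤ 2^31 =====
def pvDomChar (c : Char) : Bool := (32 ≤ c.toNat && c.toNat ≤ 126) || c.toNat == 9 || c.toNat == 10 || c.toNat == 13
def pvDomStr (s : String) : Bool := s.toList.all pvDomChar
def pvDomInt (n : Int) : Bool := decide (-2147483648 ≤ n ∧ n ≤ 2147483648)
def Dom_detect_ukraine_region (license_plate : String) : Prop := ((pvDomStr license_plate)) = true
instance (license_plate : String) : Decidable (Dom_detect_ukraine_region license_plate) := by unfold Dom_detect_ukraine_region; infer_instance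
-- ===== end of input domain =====

-- B replaces A's nested scan (startswith over each region's code list) by a flat
-- hardcoded reverse index code -> region (first-wins on the duplicate code "HH"),
-- so the body is a single lookup of license_plate[:2]; objective: simpler.

-- ===== PORT A =====
-- A's literal dict 'ukraine_regions' (region -> its two series codes)
def pvRegionsA : List (String × List String) := [
  ("АР Крим", ["AK", "KK"]),
  ("Вінницька область", ["AB", "KB"]),
  ("Волинська область", ["AC", "KC"]),
  ("Дніпропетровська область", ["AE", "KE"]),
  ("Донецька область", ["AH", "KH"]),
  ("Житомирська область", ["AM", "KM"]),
  ("Закарпатська область", ["AO", "KO"]),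
  ("Запорізька область", ["AP", "KP"]),
  ("Івано-Франківська область", ["AT", "KT"]),
  ("Київська область", ["AI", "KI"]),
  ("м. Київ", ["AA", "KA"]),
  ("Кіровоградська область", ["BA", "HA"]),
  ("Луганська область", ["BB", "HB"]),
  ("Львівська область", ["BC", "HC"]),
  ("Миколаївська область", ["BE", "HE"]),
  ("Одеська область", ["BH", "HH"]),
  ("Полтавська область", ["BI", "HI"]),
  ("Рівненська область", ["BK", "HK"]),
  ("Сумська область", ["BM", "HM"]),
  ("Тернопільська область", ["BO", "HO"]),
  ("Харківська область", ["AX", "KX"]),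
  ("Херсонська область", ["BT", "HT"]),
  ("Хмельницька область", ["BX", "HX"]),
  ("Черкаська область", ["CA", "IA"]),
  ("Чернігівська область", ["CB", "IB"]),
  ("Чернівецька область", ["CE", "IE"]),
  ("м. Севастополь", ["CH", "HH"])]

-- inner 'for letter in letters: if license_plate.startswith(letter): return region'
def pvInnerA (s : String) : List String → Bool
  | [] => false
  | l :: rest => if PySem.Str.startswith s l then true else pvInnerA s rest

-- outer 'for region, letters in ukraine_regions.items(): …'
def pvScanA (s : String) : List (String × List String) → Option String
  | [] => none
  | (r, ls) :: rest => if pvInnerA s ls then some r else pvScanA s rest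

def detect_ukraine_region (license_plate : String) : Option String :=
  pvScanA license_plate pvRegionsA

-- ===== PORT B =====
-- B's literal dict '_PREFIX_TO_REGION' (code -> region, one entry per code)
def pvPrefixList : List (String × String) := [
  ("AK", "АР Крим"),
  ("KK", "АР Крим"),
  ("AB", "Вінницька область"),
  ("KB", "Вінницька область"),
  ("AC", "Волинська область"),
  ("KC", "Волинська область"),
  ("AE", "Дніпропетровська область"),
  ("KE", "Дніпропетровська область"),
  ("AH", "Донецька область"),
  ("KH", "Донецька область"),
  ("AM", "Житомирська область"),
  ("KM", "Житомирська область"),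
  ("AO", "Закарпатська область"),
  ("KO", "Закарпатська область"),
  ("AP", "Запорізька область"),
  ("KP", "Запорізька область"),
  ("AT", "Івано-Франківська область"),
  ("KT", "Івано-Франківська область"),
  ("AI", "Київська область"),
  ("KI", "Київська область"),
  ("AA", "м. Київ"),
  ("KA", "м. Київ"),
  ("BA", "Кіровоградська область"),
  ("HA", "Кіровоградська область"),
  ("BB", "Луганська область"),
  ("HB", "Луганська область"),
  ("BC", "Львівська область"),
  ("HC", "Львівська область"),
  ("BE", "Миколаївська область"),
  ("HE", "Миколаївська область"),
  ("BH", "Одеська область"),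
  ("HH", "Одеська область"),
  ("BI", "Полтавська область"),
  ("HI", "Полтавська область"),
  ("BK", "Рівненська область"),
  ("HK", "Рівненська область"),
  ("BM", "Сумська область"),
  ("HM", "Сумська область"),
  ("BO", "Тернопільська область"),
  ("HO", "Тернопільська область"),
  ("AX", "Харківська область"),
  ("KX", "Харківська область"),
  ("BT", "Херсонська область"),
  ("HT", "Херсонська область"),
  ("BX", "Хмельницька область"),
  ("HX", "Хмельницька область"),
  ("CA", "Черкаська область"),
  ("IA", "Черкаська область"),
  ("CB", "Чернігівська область"),
  ("IB", "Чернігівська область"),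
  ("CE", "Чернівецька область"),
  ("IE", "Чернівецька область"),
  ("CH", "м. Севастополь")]

-- 'return _PREFIX_TO_REGION.get(license_plate[:2])'
def detect_ukraine_region_alt (license_plate : String) : Option String :=
  (PySem.Dict.mk pvPrefixList).get? (PySem.Str.slice license_plate none (some 2))

-- ===== PRECONDITION & SPEC =====
def Spec_detect_ukraine_region (license_plate : String) (out : Option String) : Prop := out = detect_ukraine_region_alt license_plate
instance (license_plate : String) (out : Option String) : Decidable (Spec_detect_ukraine_region license_plate out) := by unfold Spec_detect_ukraine_region; infer_instance

-- ===== CLAIM (what is proved, stated in full; the proofs are below) =====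
def Claim_equal_detect_ukraine_region : Prop := ∀ (license_plate : String), Dom_detect_ukraine_region license_plate → Spec_detect_ukraine_region license_plate (detect_ukraine_region license_plate)

-- ===== LEMMAS AND PROOFS =====

-- first exact match of the key in A's table, scanned in order
def pvFirst (k : String) : List (String × List String) → Option String
  | [] => none
  | (r, ls) :: rest => if ls.contains k then some r else pvFirst k rest

-- A's table flattened into (code, region) pairs, in scan order
def pvFlat (tbl : List (String × List String)) : List (String × String) :=
  tbl.flatMap (fun p => p.2.map (fun l => (l, p.1)))

theorem pvStartswith_eq_beq (s l : String) (hl : l.toList.length = 2) :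
    PySem.Str.startswith s l = (PySem.Str.slice s none (some 2) == l) := by
  have hslice : (PySem.Str.slice s none (some 2)).toList = s.toList.take 2 := by
    simp [PySem.Str.toList_slice, PySem.Chars.slice_eq_listSlice,
      PySem.List.slice_to s.toList (by norm_num : (0:Int) ≤ 2)]
  have hiff : PySem.Str.startswith s l = true ↔ (PySem.Str.slice s none (some 2) == l) = true := by
    rw [PySem.Str.startswith_eq, PySem.Chars.startswith_iff, beq_iff_eq]
    constructor
    · intro hp
      apply String.ext
      rw [hslice]
      exact (List.prefix_iff_eq_take.mp hp).symm ▸ by rw [hl]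
    · intro he
      have : l.toList = s.toList.take 2 := by rw [← he, hslice]
      rw [this]
      exact List.take_prefix _ _
  exact Bool.eq_iff_iff.mpr (by simpa using hiff)

theorem pvInner_eq_contains (s : String) (ls : List String)
    (h : ∀ l ∈ ls, l.toList.length = 2) :
    pvInnerA s ls = ls.contains (PySem.Str.slice s none (some 2)) := by
  induction ls with
  | nil => rfl
  | cons l rest ih =>
    simp only [pvInnerA, List.contains_cons]
    rw [pvStartswith_eq_beq s l (h l (by simp)), ih (fun x hx => h x (by simp [hx]))]
    cases hb : (PySem.Str.slice s none (some 2) == l) <;> simp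

theorem pvScan_eq_first (s : String) (tbl : List (String × List String))
    (h : ∀ p ∈ tbl, ∀ l ∈ p.2, l.toList.length = 2) :
    pvScanA s tbl = pvFirst (PySem.Str.slice s none (some 2)) tbl := by
  induction tbl with
  | nil => rfl
  | cons p rest ih =>
    obtain ⟨r, ls⟩ := p
    simp only [pvScanA, pvFirst]
    rw [pvInner_eq_contains s ls (h (r, ls) (by simp)),
      ih (fun q hq l hl => h q (by simp [hq]) l hl)]

theorem pvGet_map_append (k r : String) (ls : List String) (rest : List (String × String)) :
    (PySem.Dict.mk (ls.map (fun l => (l, r)) ++ rest)).get? k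
      = if ls.contains k then some r else (PySem.Dict.mk rest).get? k := by
  induction ls with
  | nil => simp
  | cons l tl ih =>
    simp only [List.map_cons, List.cons_append, List.contains_cons,
      PySem.Dict.get?_mk_cons, ih]
    by_cases hk : l = k
    · simp [hk]
    · have h1 : (l == k) = false := by simp [hk]
      have h2 : (k == l) = false := by simp [Ne.symm hk]
      simp [h1, h2]

theorem pvFirst_eq_get (k : String) (tbl : List (String × List String)) :
    pvFirst k tbl = (PySem.Dict.mk (pvFlat tbl)).get? k := by
  induction tbl with
  | nil => simp [pvFirst, pvFlat, PySem.Dict.get?]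
  | cons p rest ih =>
    obtain ⟨r, ls⟩ := p
    simp only [pvFlat] at ih
    simp only [pvFirst, pvFlat, List.flatMap_cons]
    rw [pvGet_map_append, ih]

theorem pvGet_append_single (k k0 v : String) (xs : List (String × String))
    (h : (k0 == k) = false) :
    (PySem.Dict.mk (xs ++ [(k0, v)])).get? k = (PySem.Dict.mk xs).get? k := by
  induction xs with
  | nil => simp [h, PySem.Dict.get?]
  | cons p tl ih =>
    obtain ⟨k1, v1⟩ := p
    simp only [List.cons_append, PySem.Dict.get?_mk_cons, ih]

theorem pvFlat_table : pvFlat pvRegionsA = pvPrefixList ++ [("HH", "м. Севастополь")] := by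
  decide

theorem pvLen2_table : ∀ p ∈ pvRegionsA, ∀ l ∈ p.2, l.toList.length = 2 := by decide

-- ===== VERDICT (by name: the statement is the Claim_ definition above) =====
theorem detect_ukraine_region_spec : Claim_equal_detect_ukraine_region := by
  intro s _
  unfold Spec_detect_ukraine_region detect_ukraine_region detect_ukraine_region_alt
  rw [pvScan_eq_first s pvRegionsA pvLen2_table, pvFirst_eq_get, pvFlat_table]
  set k := PySem.Str.slice s none (some 2) with hk
  by_cases hHH : k = "HH"
  · rw [hHH]; decide
  · exact pvGet_append_single k "HH" "м. Севастополь" pvPrefixList (beq_eq_false_iff_ne.mpr (Ne.symm hHH))
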